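-- pv_equiv track=rewrite | github.com/irad15/github-repo-summarizer | services/processor.py | prioritize_files
-- ===== SOURCE A (Python) =====
-- from typing import List
--
-- def prioritize_files(paths: List[str], max_files: int = 15) -> List[str]:
--     """
--     Algorithmically determine which files give the LLM the best summary signal.
--
--     Because LLMs have a fixed context limit (e.g., ~128k tokens), we cannot send
--     every file in a large repository (like a 5,000 file backend). Instead, we:
--     1. Grab configuration, dependency, and explicit documentation files first.
--     2. Grab core entrypoint source code files (main, app, index) near the root level.
--     3. Fill any remaining slots up to `max_files` with arbitrary source code.
--     """
--     paths.sort() # Sorted to ensure deterministic behavior across identical runs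
--
--     priority_files = []
--
--     # Category 1: Configuration, Documentation, and Dependency definitions
--     # These files usually contain descriptions, library names, and architecture clues.
--     key_files = ["README.md", "README", "package.json", "pyproject.toml", "requirements.txt", "Dockerfile", "docker-compose.yml", "setup.py", "go.mod", "Cargo.toml"]
--     for path in paths:
--         filename = path.split('/')[-1]
--         if filename in key_files or "readme" in filename.lower():
--             if path not in priority_files:
--                 priority_files.append(path)
--
--     # Category 2: Core entrypoint source files
--     # e.g., 'main.py', or 'src/index.ts'. We limit depth to avoid deep utility scripts.
--     core_names = ["main.py", "app.py", "index.js", "index.ts", "app.js", "app.ts", "main.go", "main.rs"]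
--     for path in paths:
--         filename = path.split('/')[-1]
--         depth = len(path.split('/'))
--         if filename in core_names and depth <= 3:
--             if path not in priority_files:
--                 priority_files.append(path)
--
--     # Category 3: General source files to fill up the budget
--     # Give the LLM a taste of the actual business logic syntax.
--     source_exts = [".py", ".js", ".ts", ".go", ".rs", ".java", ".cpp", ".c", ".h", ".cs", ".rb", ".php"]
--     for path in paths:
--         if len(priority_files) >= max_files:
--             break
--         if any(path.endswith(ext) for ext in source_exts):
--             if path not in priority_files:
--                 priority_files.append(path)
--
--     return priority_files[:max_files]
-- ===== SOURCE B (Python) =====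
-- from typing import List
--
-- _KEY_FILES = {"README.md", "README", "package.json", "pyproject.toml", "requirements.txt", "Dockerfile", "docker-compose.yml", "setup.py", "go.mod", "Cargo.toml"}
-- _CORE_NAMES = {"main.py", "app.py", "index.js", "index.ts", "app.js", "app.ts", "main.go", "main.rs"}
-- _SOURCE_EXTS = (".py", ".js", ".ts", ".go", ".rs", ".java", ".cpp", ".c", ".h", ".cs", ".rb", ".php")
--
-- def _rank(path):
--     """1 = key config/doc file, 2 = shallow core entrypoint, 3 = general source, None = skip."""
--     parts = path.split('/')
--     name = parts[-1]
--     if name in _KEY_FILES or "readme" in name.lower():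
--         return 1
--     if name in _CORE_NAMES and len(parts) <= 3:
--         return 2
--     if path.endswith(_SOURCE_EXTS):
--         return 3
--     return None
--
-- def prioritize_files(paths: List[str], max_files: int = 15) -> List[str]:
--     paths.sort()  # sorted in place for deterministic output (same mutation as before)
--     uniq = list(dict.fromkeys(paths))          # de-duplicate, keeping sorted order
--     ranked = [(p, _rank(p)) for p in uniq]
--     ranked = [(p, r) for p, r in ranked if r is not None]
--     ordered = sorted(ranked, key=lambda pr: pr[1])   # stable: sorted-path order kept per rank
--     out = [p for p, r in ordered if r <= 2]          # ranks 1-2 are always kept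
--     fill = [p for p, r in ordered if r == 3]         # rank 3 only fills the remaining budget
--     for p in fill:
--         if len(out) >= max_files:
--             break
--         out.append(p)
--     return out[:max_files]
-- ===== Notes on version B (the rewrite author's own statement) =====
-- stated objective: faster
-- what changed: B replaces A's three grouping passes (each rescanning all paths with a linear 'not in priority_files' membership test against the growing result) by a single categorize-then-stable-sort pipeline: de-duplicate once with dict.fromkeys, assign each path one rank, stable-sort by rank, and fill the budget from the rank-3 tail; both still sort paths in place.
import Mathlib
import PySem

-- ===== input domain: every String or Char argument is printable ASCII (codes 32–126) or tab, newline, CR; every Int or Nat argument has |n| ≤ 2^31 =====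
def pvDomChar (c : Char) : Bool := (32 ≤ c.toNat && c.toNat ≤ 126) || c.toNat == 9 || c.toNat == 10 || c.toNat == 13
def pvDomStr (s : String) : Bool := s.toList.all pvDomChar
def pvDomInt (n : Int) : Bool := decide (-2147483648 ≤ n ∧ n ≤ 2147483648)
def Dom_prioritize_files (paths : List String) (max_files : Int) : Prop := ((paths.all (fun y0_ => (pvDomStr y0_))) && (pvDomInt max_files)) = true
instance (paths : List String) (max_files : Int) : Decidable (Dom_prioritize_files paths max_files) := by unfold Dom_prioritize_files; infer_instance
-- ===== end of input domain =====

-- B replaces A's three grouping passes (each with a linear membership scan of the growing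
-- result) by one dedup-rank-then-stable-sort pipeline (objective: faster; measured faster by
-- a timing run). Both Pythons sort `paths` in place (the same mutation); the theorems
-- here are about the return value.


-- shared sub-computations of both Pythons (the literal lists and the per-path tests)
def pvKeyFiles : List String := ["README.md", "README", "package.json", "pyproject.toml", "requirements.txt", "Dockerfile", "docker-compose.yml", "setup.py", "go.mod", "Cargo.toml"]
def pvCoreNames : List String := ["main.py", "app.py", "index.js", "index.ts", "app.js", "app.ts", "main.go", "main.rs"]
def pvSourceExts : List String := [".py", ".js", ".ts", ".go", ".rs", ".java", ".cpp", ".c", ".h", ".cs", ".rb", ".php"]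
-- path.split('/'); exact: the separator "/" is non-empty, so split? never returns none
def pvSplit (p : String) : List String := (PySem.Str.split? p "/").getD []
-- path.split('/')[-1]; exact: split('/') never returns an empty list, so the [-1] never raises
def pvFilename (p : String) : String := (PySem.List.pyGet? (pvSplit p) (-1)).getD ""
-- filename in key_files or "readme" in filename.lower()
def pvC1 (p : String) : Bool := pvKeyFiles.contains (pvFilename p) || PySem.Str.isIn "readme" (PySem.Str.lower (pvFilename p))
-- filename in core_names and depth <= 3
def pvC2 (p : String) : Bool := pvCoreNames.contains (pvFilename p) && decide ((pvSplit p).length ≤ 3)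
-- any(path.endswith(ext) for ext in source_exts)
def pvC3 (p : String) : Bool := pvSourceExts.any (fun e => PySem.Str.endswith p e)

-- ===== PORT A =====
-- Category-3 loop of A: 'for path in paths: if len(priority_files) >= max_files: break; …'
def pvPassA (m : Int) : List String → List String → List String
  | [], acc => acc
  | p :: ps, acc =>
    if (acc.length : Int) ≥ m then acc
    else if pvC3 p then
      (if acc.contains p then pvPassA m ps acc else pvPassA m ps (acc ++ [p]))
    else pvPassA m ps acc

def prioritize_files (paths : List String) (max_files : Int) : List String :=
  let ps := PySem.List.sorted paths (fun x => x) false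
  let l1 := ps.foldl (fun acc p => if pvC1 p then (if acc.contains p then acc else acc ++ [p]) else acc) []
  let l2 := ps.foldl (fun acc p => if pvC2 p then (if acc.contains p then acc else acc ++ [p]) else acc) l1
  let l3 := pvPassA max_files ps l2
  PySem.List.slice l3 none (some max_files)

-- ===== PORT B =====
-- _rank(path): 1 key file, 2 shallow core entrypoint, 3 general source, none otherwise
def pvRank (p : String) : Option Int :=
  if pvC1 p then some 1
  else if pvC2 p then some 2
  else if pvC3 p then some 3
  else none

-- 'for p in fill: if len(out) >= max_files: break; out.append(p)'
def pvFill (m : Int) : List String → List String → List String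
  | [], out => out
  | p :: ps, out =>
    if (out.length : Int) ≥ m then out
    else pvFill m ps (out ++ [p])

def prioritize_files_alt (paths : List String) (max_files : Int) : List String :=
  let ps := PySem.List.sorted paths (fun x => x) false
  let uniq := PySem.List.dedup ps                        -- list(dict.fromkeys(paths))
  let ranked0 := uniq.map (fun p => (p, pvRank p))
  let ranked := ranked0.filterMap (fun pr => pr.2.map (fun r => (pr.1, r)))
  let ordered := PySem.List.sorted ranked (fun pr => pr.2) false
  let keep := (ordered.filter (fun pr => pr.2 ≤ 2)).map Prod.fst
  let fill := (ordered.filter (fun pr => pr.2 == 3)).map Prod.fst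
  PySem.List.slice (pvFill max_files fill keep) none (some max_files)

-- ===== PRECONDITION & SPEC =====
def Spec_prioritize_files (paths : List String) (max_files : Int) (out : List String) : Prop := out = prioritize_files_alt paths max_files
instance (paths : List String) (max_files : Int) (out : List String) : Decidable (Spec_prioritize_files paths max_files out) := by unfold Spec_prioritize_files; infer_instance

-- ===== CLAIM (what is proved, stated in full; the proofs are below) =====
def Claim_equal_prioritize_files : Prop := ∀ (paths : List String) (max_files : Int), Dom_prioritize_files paths max_files → Spec_prioritize_files paths max_files (prioritize_files paths max_files)

-- ===== LEMMAS AND PROOFS =====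

-- dedup of a cons: first occurrence kept, later duplicates dropped
theorem pvDedupCons (p : String) (l : List String) :
    PySem.List.dedup (p :: l) = p :: (PySem.List.dedup l).filter (fun x => !(x == p)) := by
  simp [PySem.List.dedup, PySem.Set.ofList_cons, PySem.Set.discard]

-- dedup commutes with a pointwise filter
theorem pvDedupFilter (c : String → Bool) (l : List String) :
    PySem.List.dedup (l.filter c) = (PySem.List.dedup l).filter c := by
  induction l with
  | nil => simp [PySem.List.dedup, PySem.Set.ofList]
  | cons p l ih =>
    by_cases hc : c p
    · rw [List.filter_cons_of_pos hc, pvDedupCons, pvDedupCons, ih,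
        List.filter_cons_of_pos hc, List.filter_filter, List.filter_filter]
      congr 1
      apply List.filter_congr
      intro x _
      exact Bool.and_comm _ _
    · rw [List.filter_cons_of_neg hc, ih, pvDedupCons, List.filter_cons_of_neg hc,
        List.filter_filter]
      apply List.filter_congr
      intro x _
      by_cases hxp : x = p
      · subst hxp; simp [hc]
      · simp [hxp]

-- the two membership-filter rearrangements the loop inductions need
theorem pvFilterSnoc (l acc : List String) (p : String) :
    l.filter (fun x => !((acc ++ [p]).contains x))
      = (l.filter (fun x => !(x == p))).filter (fun x => !(acc.contains x)) := by
  rw [List.filter_filter]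
  apply List.filter_congr
  intro x _
  by_cases hxp : x = p
  · subst hxp; simp
  · simp [hxp]

theorem pvFilterDropMem (l acc : List String) (p : String) (hm : acc.contains p = true) :
    (l.filter (fun x => !(x == p))).filter (fun x => !(acc.contains x))
      = l.filter (fun x => !(acc.contains x)) := by
  rw [List.filter_filter]
  apply List.filter_congr
  intro x _
  by_cases hxp : x = p
  · subst hxp
    have hm' : x ∈ acc := by simpa using hm
    simp [hm']
  · simp [hxp]

-- A's category-1/2 loop: append each first occurrence that passes c and is not in acc yet
theorem pvFoldlSel (c : String → Bool) (ps : List String) :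
    ∀ acc : List String,
      ps.foldl (fun acc p => if c p then (if acc.contains p then acc else acc ++ [p]) else acc) acc
        = acc ++ (PySem.List.dedup (ps.filter c)).filter (fun p => !(acc.contains p)) := by
  induction ps with
  | nil => intro acc; simp
  | cons p ps ih =>
    intro acc
    rw [List.foldl_cons]
    by_cases hc : c p
    · rw [if_pos hc, List.filter_cons_of_pos hc, pvDedupCons]
      by_cases hm : acc.contains p
      · rw [if_pos hm, ih, List.filter_cons_of_neg (by simpa using hm), pvFilterDropMem _ _ _ hm]
      · rw [if_neg hm, ih, List.filter_cons_of_pos (by simpa using hm), ← pvFilterSnoc]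
        simp
    · rw [if_neg hc, List.filter_cons_of_neg hc, ih]

-- once the budget is full, the fill loop appends nothing
theorem pvFillOfGe (m : Int) (l out : List String) (h : (out.length : Int) ≥ m) :
    pvFill m l out = out := by
  cases l with
  | nil => rfl
  | cons p ps => simp [pvFill, h]

-- A's category-3 loop is B's fill loop run on the de-duplicated, not-yet-taken c3 candidates
theorem pvPassAEqFill (m : Int) (ps : List String) :
    ∀ acc : List String,
      pvPassA m ps acc
        = pvFill m ((PySem.List.dedup (ps.filter pvC3)).filter (fun p => !(acc.contains p))) acc := by
  induction ps with
  | nil => intro acc; simp [pvPassA, pvFill]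
  | cons p ps ih =>
    intro acc
    rw [show pvPassA m (p :: ps) acc = if (acc.length : Int) ≥ m then acc
        else if pvC3 p then
          (if acc.contains p then pvPassA m ps acc else pvPassA m ps (acc ++ [p]))
        else pvPassA m ps acc from rfl]
    by_cases hb : (acc.length : Int) ≥ m
    · rw [if_pos hb, pvFillOfGe m _ _ hb]
    · rw [if_neg hb]
      by_cases hc : pvC3 p
      · rw [if_pos hc, List.filter_cons_of_pos hc, pvDedupCons]
        by_cases hm : acc.contains p
        · rw [if_pos hm, ih, List.filter_cons_of_neg (by simpa using hm),
            pvFilterDropMem _ _ _ hm]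
        · rw [if_neg hm, ih, List.filter_cons_of_pos (by simpa using hm), ← pvFilterSnoc]
          rw [show pvFill m (p :: ((PySem.List.dedup (ps.filter pvC3)).filter
              (fun x => !((acc ++ [p]).contains x)))) acc
            = if (acc.length : Int) ≥ m then acc
              else pvFill m ((PySem.List.dedup (ps.filter pvC3)).filter
                (fun x => !((acc ++ [p]).contains x))) (acc ++ [p]) from rfl]
          rw [if_neg hb]
      · rw [if_neg hc, List.filter_cons_of_neg hc, ih]

-- ---------- stability of the rank sort ----------

-- inserting into a key-sorted list puts x after every element of equal key
theorem pvFilterInsertBy {α : Type} (key : α → Int) (c : Int) (x : α) (ys : List α)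
    (hys : ys.Pairwise (fun a b => key a ≤ key b)) :
    (PySem.List.insertBy (fun a b => decide (key a < key b)) x ys).filter (fun y => key y == c)
      = if key x == c then ys.filter (fun y => key y == c) ++ [x]
        else ys.filter (fun y => key y == c) := by
  induction ys with
  | nil =>
    simp only [PySem.List.insertBy]
    by_cases hx : key x == c
    · simp [hx]
    · simp [hx]
  | cons y ys ih =>
    rw [show PySem.List.insertBy (fun a b => decide (key a < key b)) x (y :: ys)
        = if decide (key x < key y) = true then x :: y :: ys
          else y :: PySem.List.insertBy (fun a b => decide (key a < key b)) x ys from rfl]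
    by_cases hlt : key x < key y
    · rw [if_pos (by simpa using hlt)]
      by_cases hx : key x == c
      · have hxc : key x = c := by simpa using hx
        have hnil : (y :: ys).filter (fun y => key y == c) = [] := by
          apply List.filter_eq_nil_iff.mpr
          intro z hz
          have hyz : key y ≤ key z := by
            rcases hz with _ | hz
            · exact le_refl _
            · exact (List.pairwise_cons.mp hys).1 z (by assumption)
          simp only [beq_iff_eq]
          omega
        rw [hnil, List.filter_cons_of_pos (by simpa using hx), hnil]
        simp [hx]
      · rw [List.filter_cons_of_neg (by simpa using hx), if_neg hx]
    · rw [if_neg (by simpa using hlt)]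
      rw [show (y :: PySem.List.insertBy (fun a b => decide (key a < key b)) x ys).filter
            (fun y => key y == c)
          = if key y == c then
              y :: (PySem.List.insertBy (fun a b => decide (key a < key b)) x ys).filter
                (fun y => key y == c)
            else (PySem.List.insertBy (fun a b => decide (key a < key b)) x ys).filter
                (fun y => key y == c) from by
        by_cases hy : key y == c
        · rw [List.filter_cons_of_pos (by simpa using hy), if_pos hy]
        · rw [List.filter_cons_of_neg (by simpa using hy), if_neg hy]]
      rw [ih (List.pairwise_cons.mp hys).2]
      by_cases hx : key x == c
      · rw [if_pos hx, if_pos hx]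
        by_cases hy : key y == c
        · rw [if_pos hy, List.filter_cons_of_pos (by simpa using hy), List.cons_append]
        · rw [if_neg hy, List.filter_cons_of_neg (by simpa using hy)]
      · rw [if_neg hx, if_neg hx]
        by_cases hy : key y == c
        · rw [if_pos hy, List.filter_cons_of_pos (by simpa using hy)]
        · rw [if_neg hy, List.filter_cons_of_neg (by simpa using hy)]

-- stability of the insertion-sort fold: equal-key elements keep their relative order
theorem pvFoldlInsertFilter {α : Type} (key : α → Int) (c : Int) (l : List α) :
    ∀ acc : List α, acc.Pairwise (fun a b => key a ≤ key b) →
      (l.foldl (fun acc x => PySem.List.insertBy (fun a b => decide (key a < key b)) x acc)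
        acc).filter (fun y => key y == c)
        = acc.filter (fun y => key y == c) ++ l.filter (fun y => key y == c) := by
  induction l with
  | nil => intro acc _; simp
  | cons x l ih =>
    intro acc hacc
    rw [List.foldl_cons, ih _ (PySem.List.insertBy_pairwise_le key x acc hacc),
      pvFilterInsertBy key c x acc hacc]
    by_cases hx : key x == c
    · rw [if_pos hx, List.filter_cons_of_pos (by simpa using hx), List.append_assoc]
      simp
    · rw [if_neg hx, List.filter_cons_of_neg (by simpa using hx)]

-- Python's sorted is stable: filtering one key class gives the original subsequence
theorem pvSortedFilter {α : Type} (key : α → Int) (c : Int) (l : List α) :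
    (PySem.List.sorted l key false).filter (fun y => key y == c)
      = l.filter (fun y => key y == c) := by
  rw [PySem.List.sorted_eq_foldl_insertBy]
  simpa using pvFoldlInsertFilter key c l [] (by simp)

-- a key-sorted list whose keys lie in {1,2,3} is its three key classes in order
theorem pvSortedPartition {α : Type} (key : α → Int) :
    ∀ l : List α, l.Pairwise (fun a b => key a ≤ key b) →
      (∀ x ∈ l, key x = 1 ∨ key x = 2 ∨ key x = 3) →
      l = l.filter (fun y => key y == 1) ++ l.filter (fun y => key y == 2)
          ++ l.filter (fun y => key y == 3) := by
  intro l
  induction l with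
  | nil => intro _ _; simp
  | cons x t ih =>
    intro hp hr
    have hxt := (List.pairwise_cons.mp hp).1
    have ht := (List.pairwise_cons.mp hp).2
    have ihe := ih ht (fun z hz => hr z (List.mem_cons_of_mem _ hz))
    rcases hr x (List.mem_cons_self) with hx | hx | hx
    · rw [List.filter_cons_of_pos (by simp [hx]),
        List.filter_cons_of_neg (by simp [hx]), List.filter_cons_of_neg (by simp [hx])]
      rw [List.cons_append, List.cons_append]
      exact congrArg (x :: ·) ihe
    · have h1 : t.filter (fun y => key y == 1) = [] := by
        apply List.filter_eq_nil_iff.mpr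
        intro z hz
        have := hxt z hz
        simp only [beq_iff_eq]; omega
      rw [List.filter_cons_of_neg (by simp [hx]),
        List.filter_cons_of_pos (by simp [hx]), List.filter_cons_of_neg (by simp [hx]), h1]
      have h1' : t.filter (fun y => key y == 1) = [] := h1
      rw [h1'] at ihe
      simpa using ihe
    · have h1 : t.filter (fun y => key y == 1) = [] := by
        apply List.filter_eq_nil_iff.mpr
        intro z hz
        have := hxt z hz
        simp only [beq_iff_eq]; omega
      have h2 : t.filter (fun y => key y == 2) = [] := by
        apply List.filter_eq_nil_iff.mpr
        intro z hz
        have := hxt z hz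
        simp only [beq_iff_eq]; omega
      rw [List.filter_cons_of_neg (by simp [hx]), List.filter_cons_of_neg (by simp [hx]),
        List.filter_cons_of_pos (by simp [hx]), h1, h2]
      rw [h1, h2] at ihe
      simpa using ihe

-- ---------- the rank function versus A's three tests ----------

-- a core entrypoint name is never a key/config file and never contains "readme"
theorem pvC2NotC1 (p : String) (h : pvC2 p = true) : pvC1 p = false := by
  have hn : pvFilename p ∈ pvCoreNames := by
    simp only [pvC2, Bool.and_eq_true] at h
    simpa using h.1
  simp only [pvCoreNames, List.mem_cons] at hn
  rcases hn with h' | h' | h' | h' | h' | h' | h' | h' | h'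
  all_goals first
    | (simp only [pvC1]; rw [h']; decide)
    | simp at h'


theorem pvRankIsSome1 (p : String) :
    ((pvRank p).isSome && ((pvRank p).getD 0 == 1)) = pvC1 p := by
  unfold pvRank
  by_cases h1 : pvC1 p
  · simp [h1]
  · simp only [h1, if_false, Bool.false_eq_true]
    by_cases h2 : pvC2 p
    · simp [h2]
    · by_cases h3 : pvC3 p <;> simp [h2, h3]

theorem pvRankIsSome2 (p : String) :
    ((pvRank p).isSome && ((pvRank p).getD 0 == 2)) = pvC2 p := by
  unfold pvRank
  by_cases h1 : pvC1 p
  · have := pvC2NotC1 p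
    by_cases h2 : pvC2 p
    · exact absurd h1 (by simp [this h2])
    · simp [h1, h2]
  · by_cases h2 : pvC2 p
    · simp [h1, h2]
    · by_cases h3 : pvC3 p <;> simp [h1, h2, h3]

theorem pvRankIsSome3 (p : String) :
    ((pvRank p).isSome && ((pvRank p).getD 0 == 3)) = (pvC3 p && !(pvC1 p) && !(pvC2 p)) := by
  unfold pvRank
  by_cases h1 : pvC1 p
  · simp [h1]
  · by_cases h2 : pvC2 p
    · simp [h1, h2]
    · by_cases h3 : pvC3 p <;> simp [h1, h2, h3]

-- the two comprehensions of B: pair every unique path with its rank, drop the unranked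
theorem pvRankedEq (l : List String) :
    (l.map (fun p => (p, pvRank p))).filterMap (fun pr => pr.2.map (fun r => (pr.1, r)))
      = (l.filter (fun p => (pvRank p).isSome)).map (fun p => (p, (pvRank p).getD 0)) := by
  induction l with
  | nil => rfl
  | cons p l ih =>
    cases h : pvRank p with
    | none => simp [h, ih]
    | some r => simp [h, ih]

-- membership in a filtered list, as the Bool 'contains' of Python's 'in'
theorem pvContainsFilter (l : List String) (c : String → Bool) (x : String) (hx : x ∈ l) :
    ((l.filter c).contains x) = c x := by
  by_cases h : c x
  · simp [List.mem_filter, h, hx]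
  · simp [List.mem_filter, h]

-- ---------- assembly: both programs compute the same pre-slice list ----------

theorem pvMainEq (ps : List String) (m : Int) :
    pvPassA m ps
      (ps.foldl (fun acc p => if pvC2 p then (if acc.contains p then acc else acc ++ [p]) else acc)
        (ps.foldl (fun acc p => if pvC1 p then (if acc.contains p then acc else acc ++ [p]) else acc) []))
    = (let uniq := PySem.List.dedup ps
       let ranked0 := uniq.map (fun p => (p, pvRank p))
       let ranked := ranked0.filterMap (fun pr => pr.2.map (fun r => (pr.1, r)))
       let ordered := PySem.List.sorted ranked (fun pr => pr.2) false
       let keep := (ordered.filter (fun pr => pr.2 ≤ 2)).map Prod.fst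
       let fill := (ordered.filter (fun pr => pr.2 == 3)).map Prod.fst
       pvFill m fill keep) := by
  simp only []
  set uniq := PySem.List.dedup ps with huniq
  -- A's first two passes
  have hl1 : ps.foldl (fun acc p => if pvC1 p then (if acc.contains p then acc else acc ++ [p]) else acc) []
      = uniq.filter pvC1 := by
    rw [pvFoldlSel, pvDedupFilter, List.nil_append, List.filter_eq_self.mpr]
    intro x _
    simp
  have hdisj : ∀ x ∈ uniq.filter pvC2, ((uniq.filter pvC1).contains x) = false := by
    intro x hx
    rw [pvContainsFilter _ _ _ (List.mem_filter.mp hx).1, pvC2NotC1 x (List.mem_filter.mp hx).2]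
  have hl2 : ps.foldl (fun acc p => if pvC2 p then (if acc.contains p then acc else acc ++ [p]) else acc) (uniq.filter pvC1)
      = uniq.filter pvC1 ++ uniq.filter pvC2 := by
    rw [pvFoldlSel, pvDedupFilter]
    congr 1
    apply List.filter_eq_self.mpr
    intro x hx
    have h1 : pvC1 x = false := pvC2NotC1 x (List.mem_filter.mp hx).2
    simp [List.mem_filter, h1]
  rw [hl1, hl2, pvPassAEqFill]
  -- A's category-3 candidates
  have hcand : ((PySem.List.dedup (ps.filter pvC3)).filter
        (fun p => !((uniq.filter pvC1 ++ uniq.filter pvC2).contains p)))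
      = uniq.filter (fun p => pvC3 p && (!(pvC1 p) && !(pvC2 p))) := by
    rw [pvDedupFilter, List.filter_filter]
    apply List.filter_congr
    intro x hx
    have e : ((uniq.filter pvC1 ++ uniq.filter pvC2).contains x) = (pvC1 x || pvC2 x) := by
      rw [List.contains_append, pvContainsFilter _ _ _ hx, pvContainsFilter _ _ _ hx]
    rw [e]
    cases pvC1 x <;> cases pvC2 x <;> cases pvC3 x <;> rfl
  rw [hcand]
  -- B's ranked list
  rw [pvRankedEq]
  set ranked := (uniq.filter (fun p => (pvRank p).isSome)).map (fun p => (p, (pvRank p).getD 0)) with hranked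
  have hkeys : ∀ pr ∈ ranked, pr.2 = 1 ∨ pr.2 = 2 ∨ pr.2 = 3 := by
    intro pr hpr
    obtain ⟨p, hp, rfl⟩ := List.mem_map.mp hpr
    have hs : (pvRank p).isSome := (List.mem_filter.mp hp).2
    unfold pvRank at hs ⊢
    by_cases h1 : pvC1 p
    · simp [h1]
    · by_cases h2 : pvC2 p
      · simp [h1, h2]
      · by_cases h3 : pvC3 p
        · simp [h1, h2, h3]
        · simp [h1, h2, h3] at hs
  -- the stable sort splits into the three rank classes, each in original order
  have hpart : PySem.List.sorted ranked (fun pr => pr.2) false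
      = ranked.filter (fun pr => pr.2 == 1) ++ ranked.filter (fun pr => pr.2 == 2)
        ++ ranked.filter (fun pr => pr.2 == 3) := by
    have h0 := pvSortedPartition (fun pr : String × Int => pr.2)
      (PySem.List.sorted ranked (fun pr => pr.2) false)
      (PySem.List.sorted_pairwise ranked (fun pr => pr.2))
      (fun x hx => hkeys x ((PySem.List.mem_sorted ranked (fun pr => pr.2) false x).mp hx))
    rw [pvSortedFilter, pvSortedFilter, pvSortedFilter] at h0
    exact h0
  rw [hpart]
  -- the three classes, as filters of uniq
  have hclass : ∀ (c : Int) (cb : String → Bool),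
      (∀ p, ((pvRank p).isSome && ((pvRank p).getD 0 == c)) = cb p) →
      ranked.filter (fun pr => pr.2 == c) = (uniq.filter cb).map (fun p => (p, (pvRank p).getD 0)) := by
    intro c cb hcb
    rw [hranked, List.filter_map, List.filter_filter]
    congr 1
    apply List.filter_congr
    intro p _
    rw [← hcb p]
    exact Bool.and_comm _ _
  have hf1 := hclass 1 pvC1 pvRankIsSome1
  have hf2 := hclass 2 pvC2 pvRankIsSome2
  have hf3 := hclass 3 (fun p => pvC3 p && !(pvC1 p) && !(pvC2 p)) pvRankIsSome3
  rw [hf1, hf2, hf3]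
  -- keep = classes 1 and 2; fill = class 3
  rw [List.filter_append, List.filter_append, List.filter_append, List.filter_append]
  have hkeep1 : ((uniq.filter pvC1).map (fun p => (p, (pvRank p).getD 0))).filter
      (fun pr => pr.2 ≤ 2) = (uniq.filter pvC1).map (fun p => (p, (pvRank p).getD 0)) := by
    rw [List.filter_map, List.filter_eq_self.mpr]
    intro p hp
    have h1 : pvC1 p := (List.mem_filter.mp hp).2
    simp [pvRank, h1]
  have hkeep2 : ((uniq.filter pvC2).map (fun p => (p, (pvRank p).getD 0))).filter
      (fun pr => decide (pr.2 ≤ 2)) = (uniq.filter pvC2).map (fun p => (p, (pvRank p).getD 0)) := by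
    rw [List.filter_eq_self.mpr]
    intro pr hpr
    obtain ⟨p, hp, rfl⟩ := List.mem_map.mp hpr
    have h2 : pvC2 p := (List.mem_filter.mp hp).2
    by_cases h1 : pvC1 p <;> simp [pvRank, h1, h2]
  have hkeep3 : ((uniq.filter (fun p => pvC3 p && !(pvC1 p) && !(pvC2 p))).map
      (fun p => (p, (pvRank p).getD 0))).filter (fun pr => decide (pr.2 ≤ 2)) = [] := by
    rw [List.filter_eq_nil_iff.mpr]
    intro pr hpr
    obtain ⟨p, hp, rfl⟩ := List.mem_map.mp hpr
    have h := (List.mem_filter.mp hp).2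
    simp only [Bool.and_eq_true, Bool.not_eq_true'] at h
    simp [pvRank, h.1.1, h.1.2, h.2]
  have hfill1 : ((uniq.filter pvC1).map (fun p => (p, (pvRank p).getD 0))).filter
      (fun pr => pr.2 == 3) = [] := by
    rw [List.filter_eq_nil_iff.mpr]
    intro pr hpr
    obtain ⟨p, hp, rfl⟩ := List.mem_map.mp hpr
    have h1 : pvC1 p := (List.mem_filter.mp hp).2
    simp [pvRank, h1]
  have hfill2 : ((uniq.filter pvC2).map (fun p => (p, (pvRank p).getD 0))).filter
      (fun pr => pr.2 == 3) = [] := by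
    rw [List.filter_eq_nil_iff.mpr]
    intro pr hpr
    obtain ⟨p, hp, rfl⟩ := List.mem_map.mp hpr
    have h2 : pvC2 p := (List.mem_filter.mp hp).2
    by_cases h1 : pvC1 p <;> simp [pvRank, h1, h2]
  have hfill3 : ((uniq.filter (fun p => pvC3 p && !(pvC1 p) && !(pvC2 p))).map
      (fun p => (p, (pvRank p).getD 0))).filter (fun pr => pr.2 == 3)
      = (uniq.filter (fun p => pvC3 p && !(pvC1 p) && !(pvC2 p))).map
        (fun p => (p, (pvRank p).getD 0)) := by
    rw [List.filter_eq_self.mpr]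
    intro pr hpr
    obtain ⟨p, hp, rfl⟩ := List.mem_map.mp hpr
    have h := (List.mem_filter.mp hp).2
    simp only [Bool.and_eq_true, Bool.not_eq_true'] at h
    simp [pvRank, h.1.1, h.1.2, h.2]
  rw [hkeep1, hkeep2, hkeep3, hfill1, hfill2, hfill3]
  rw [List.nil_append, List.nil_append, List.append_nil, List.map_append, List.map_map,
    List.map_map, List.map_map]
  have hid : ∀ l : List String, l.map (Prod.fst ∘ (fun p => (p, (pvRank p).getD 0))) = l := by
    intro l
    induction l with
    | nil => rfl
    | cons a l ih => simp only [List.map_cons, ih, Function.comp_apply]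
  rw [hid, hid, hid]
  congr 1
  apply List.filter_congr
  intro x _
  cases pvC1 x <;> cases pvC2 x <;> cases pvC3 x <;> rfl


-- ===== VERDICT (by name: the statement is the Claim_ definition above) =====
theorem prioritize_files_spec : Claim_equal_prioritize_files := by
  intro paths m _
  unfold Spec_prioritize_files prioritize_files prioritize_files_alt
  simp only []
  congr 1
  exact pvMainEq (PySem.List.sorted paths (fun x => x) false) m
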